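-- pv_equiv track=rewrite | github.com/karimhozaien/Random-Maze-Generator | labyrinthe.py | creerTab
-- ===== SOURCE A (Python) =====
-- def creerTab(nx,ny):
-- # Le code suivant est inspiree de la fonction creerMatrice de la page 28 du
-- # chapitre 8 du cours.
--     tab = [None]*nx
--     compteur = 0
-- # On cree les colonne et les range de notre tableau en 2 dimensions. On le
-- # rempli de 0 temporairement.
--     for i in range(nx):
--         tab[i] = [0]*(ny)
-- # On numerote chaque case de notre tableau de 0 a nx*ny-1.
--     for m in range(ny):
--         for i in range(nx):
--             tab[i][m] = compteur
--             compteur+=1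
--     return tab
-- ===== SOURCE B (Python) =====
-- def creerTab(nx, ny):
--     # Closed form: the column-major counter gives tab[i][m] == m*nx + i.
--     return [[m * nx + i for m in range(ny)] for i in range(nx)]
-- ===== Notes on version B (the rewrite author's own statement) =====
-- stated objective: simpler
-- what changed: Replaces the zero-fill pass plus the sequential counter-incrementing double loop with a direct closed-form construction: cell (i,m) is computed as m*nx+i from its indices, with no accumulator and no in-place mutation.
import Mathlib
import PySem

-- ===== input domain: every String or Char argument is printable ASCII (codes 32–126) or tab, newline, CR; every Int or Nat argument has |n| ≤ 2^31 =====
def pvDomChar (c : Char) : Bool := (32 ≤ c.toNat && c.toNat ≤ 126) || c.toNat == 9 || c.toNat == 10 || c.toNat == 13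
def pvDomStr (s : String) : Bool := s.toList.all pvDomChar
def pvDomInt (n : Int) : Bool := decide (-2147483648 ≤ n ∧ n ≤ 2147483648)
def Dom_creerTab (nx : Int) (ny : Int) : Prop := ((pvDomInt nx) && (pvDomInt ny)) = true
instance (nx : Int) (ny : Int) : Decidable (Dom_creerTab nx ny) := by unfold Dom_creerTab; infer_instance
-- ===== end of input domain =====

-- B replaces A's zero-fill pass and counter-incrementing double loop by the closed form tab[i][m] = m*nx + i (objective: simpler; same asymptotic cost).

-- ===== PORT A =====
-- tab = [None]*nx : we use [] as the None placeholder — every such cell is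
-- overwritten by the first loop before it is ever read (exact for the result).
def creerTab (nx : Int) (ny : Int) : List (List Int) :=
  let tab0 : List (List Int) := List.replicate nx.toNat []
  -- for i in range(nx): tab[i] = [0]*ny
  let tab1 := (PySem.List.pyRange 0 nx 1).foldl
      (fun t i => t.set i.toNat (List.replicate ny.toNat 0)) tab0
  -- compteur = 0; for m in range(ny): for i in range(nx): tab[i][m] = compteur; compteur += 1
  let st := (PySem.List.pyRange 0 ny 1).foldl
      (fun (p : List (List Int) × Int) m =>
        (PySem.List.pyRange 0 nx 1).foldl
          (fun (q : List (List Int) × Int) i =>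
            (q.1.modify i.toNat (fun row => row.set m.toNat q.2), q.2 + 1)) p)
      (tab1, 0)
  st.1

-- ===== PORT B =====
def creerTab_alt (nx : Int) (ny : Int) : List (List Int) :=
  (PySem.List.pyRange 0 nx 1).map
    (fun i => (PySem.List.pyRange 0 ny 1).map (fun m => m * nx + i))

-- ===== PRECONDITION & SPEC =====
def Spec_creerTab (nx : Int) (ny : Int) (out : List (List Int)) : Prop := out = creerTab_alt nx ny
instance (nx : Int) (ny : Int) (out : List (List Int)) : Decidable (Spec_creerTab nx ny out) := by unfold Spec_creerTab; infer_instance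

-- ===== CLAIM (what is proved, stated in full; the proofs are below) =====
def Claim_equal_creerTab : Prop := ∀ (nx : Int) (ny : Int), Dom_creerTab nx ny → Spec_creerTab nx ny (creerTab nx ny)

-- ===== LEMMAS AND PROOFS =====

-- Phase 1: the zero-fill loop keeps the length of the table.
theorem pv_fold_set_length (r : List Int) (n : Nat) (t : List (List Int)) :
    ((List.range n).foldl (fun t k => t.set k r) t).length = t.length := by
  induction n generalizing t with
  | zero => simp
  | succ n ih => simp [List.range_succ, List.foldl_append, ih]

-- Phase 1: index-wise description of the zero-fill loop.
theorem pv_fold_set_getElem? (r : List Int) (n : Nat) (t : List (List Int)) (j : Nat) :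
    ((List.range n).foldl (fun t k => t.set k r) t)[j]? =
      if j < n ∧ j < t.length then some r else t[j]? := by
  induction n generalizing t with
  | zero => simp
  | succ n ih =>
    simp only [List.range_succ, List.foldl_append, List.foldl_cons, List.foldl_nil]
    rw [List.getElem?_set, pv_fold_set_length, ih]
    split_ifs <;> first
      | rfl
      | omega
      | (exact (List.getElem?_eq_none (by omega)).symm)

-- Phase 1 result: the table after the fill loop is replicate a ([0]*b).
theorem pv_phase1 (a : Nat) (r : List Int) :
    ((List.range a).foldl (fun t k => t.set k r) (List.replicate a ([] : List Int))) =
      List.replicate a r := by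
  apply List.ext_getElem?
  intro j
  rw [pv_fold_set_getElem?]
  simp only [List.length_replicate, List.getElem?_replicate]
  split_ifs <;> first | rfl | omega

-- Setting one cell of a mapped range rewrites the generating function at that index.
theorem pv_set_map_range (b n : Nat) (f : Nat → Int) (v : Int) (hn : n < b) :
    ((List.range b).map f).set n v =
      (List.range b).map (fun j => if j = n then v else f j) := by
  apply List.ext_getElem?
  intro j
  rw [List.getElem?_set]
  by_cases hj : j < b
  · rw [List.getElem?_map, List.getElem?_map, List.getElem?_range hj]
    by_cases h : n = j
    · subst h; simp [hj]
    · have hjn : j ≠ n := fun hh => h hh.symm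
      simp [h, hjn]
  · have hb : (List.range b)[j]? = none := List.getElem?_eq_none (by simpa using hj)
    rw [List.getElem?_map, List.getElem?_map, hb]
    have : n ≠ j := by omega
    simp [this]

-- Phase 2, inner loop: counter advances by a, row j (j < a) gets cell mm set to c + j.
theorem pv_inner (mm a : Nat) (t : List (List Int)) (c : Int) :
    ((List.range a).foldl
        (fun (q : List (List Int) × Int) k =>
          (q.1.modify k (fun row => row.set mm q.2), q.2 + 1)) (t, c)).2 = c + a ∧
    ∀ j, ((List.range a).foldl
        (fun (q : List (List Int) × Int) k =>
          (q.1.modify k (fun row => row.set mm q.2), q.2 + 1)) (t, c)).1[j]? =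
      if j < a then (fun row => row.set mm (c + (j : Int))) <$> t[j]? else t[j]? := by
  induction a with
  | zero => simp
  | succ a ih =>
    obtain ⟨ih2, ih1⟩ := ih
    simp only [List.range_succ, List.foldl_append, List.foldl_cons, List.foldl_nil]
    constructor
    · rw [ih2]; push_cast; ring
    · intro j
      rw [List.getElem?_modify, ih2, ih1 j]
      by_cases hj : a = j
      · subst hj
        simp
      · by_cases hja : j < a
        · have hs : j < a + 1 := by omega
          rw [if_pos hja, if_pos hs]
          cases t[j]? <;> simp [hj]
        · have h1 : ¬ j < a + 1 := by omega
          rw [if_neg hja, if_neg h1]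
          cases t[j]? <;> simp [hj]

-- Phase 2, outer loop: after n columns, cell (i,m) holds m*A+i for m < n, else 0.
theorem pv_phase2 (A B n : Nat) (hn : n ≤ B) :
    ((List.range n).foldl
        (fun (p : List (List Int) × Int) j =>
          (List.range A).foldl
            (fun (q : List (List Int) × Int) k =>
              (q.1.modify k (fun row => row.set j q.2), q.2 + 1)) p)
        (List.replicate A (List.replicate B (0 : Int)), 0)) =
      ((List.range A).map (fun (i : Nat) =>
          (List.range B).map (fun (j : Nat) =>
            if j < n then (j : Int) * (A : Int) + (i : Int) else 0)),
       (n : Int) * (A : Int)) := by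
  induction n with
  | zero =>
    simp only [List.range_zero, List.foldl_nil, Nat.cast_zero, zero_mul]
    refine Prod.ext ?_ rfl
    apply List.ext_getElem?
    intro i
    by_cases hi : i < A
    · rw [List.getElem?_replicate, if_pos hi, List.getElem?_map, List.getElem?_range hi]
      simp
    · have hA : A ≤ i := by omega
      rw [List.getElem?_replicate, if_neg hi, List.getElem?_map,
        List.getElem?_eq_none (by simpa using hA)]
      rfl
  | succ n ih =>
    have hnB : n < B := by omega
    simp only [List.range_succ, List.foldl_append, List.foldl_cons, List.foldl_nil]
    rw [ih (by omega)]
    obtain ⟨h2, h1⟩ := pv_inner n A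
      ((List.range A).map (fun (i : Nat) =>
        (List.range B).map (fun (j : Nat) =>
          if j < n then (j : Int) * (A : Int) + (i : Int) else 0)))
      ((n : Int) * (A : Int))
    refine Prod.ext ?_ ?_
    · apply List.ext_getElem?
      intro i
      rw [h1 i]
      by_cases hi : i < A
      · rw [if_pos hi, List.getElem?_map, List.getElem?_map, List.getElem?_range hi]
        simp only [Option.map_some, Option.map_eq_map]
        congr 1
        rw [pv_set_map_range B n _ _ hnB]
        apply List.map_congr_left
        intro j hj
        by_cases hjn : j = n
        · subst hjn; simp
        · by_cases hjl : j < n <;> simp [hjn, hjl] <;> omega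
      · have hA : (List.range A)[i]? = none := List.getElem?_eq_none (by simpa using hi)
        rw [if_neg hi, List.getElem?_map, List.getElem?_map, hA]
        rfl
    · rw [h2]
      push_cast; ring

-- ===== VERDICT (by name: the statement is the Claim_ definition above) =====
theorem creerTab_spec : Claim_equal_creerTab := by
  intro nx ny _
  unfold Spec_creerTab creerTab creerTab_alt
  simp only [PySem.List.pyRange_one, Int.sub_zero, zero_add, List.foldl_map, List.map_map,
    Int.toNat_natCast, Function.comp_def]
  rw [pv_phase1, pv_phase2 nx.toNat ny.toNat ny.toNat (le_refl _)]
  apply List.map_congr_left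
  intro i hi
  apply List.map_congr_left
  intro j hj
  rw [List.mem_range] at hi hj
  rw [if_pos hj]
  have hnx : 0 ≤ nx := by omega
  rw [Int.toNat_of_nonneg hnx]
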